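-- pv_equiv track=rewrite | github.com/EdwardBrodskiy/comparing_CFGs | tools.py | generate_all_non_nullable_combinations
-- ===== SOURCE A (Python) =====
-- def generate_all_non_nullable_combinations(rule, nullable):
--     new_rules = []
--     # extract the locations of nullable non terminals
--     nullables_at = list(filter(lambda sr_i: rule[sr_i] in nullable, range(len(rule))))
--
--     no_nullables = len(nullables_at)
--     for i in range(2 ** no_nullables):
--         new_rule = []
--         # create a unique string of ones and zeros representing a unique combination of nullables to use
--         nullables_to_use = '0' * no_nullables + f'{i:b}'  # convert to binary and add preceding zeros
--         nullable_index = 0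
--         for sub_rule_index, sub_rule in enumerate(rule):
--             # if we are at a nullable skip if binary digit is 0 else add it
--             if nullable_index < len(nullables_at) and sub_rule_index == nullables_at[nullable_index]:
--                 nullable_index += 1
--                 if nullables_to_use[-nullable_index] == '0':
--                     continue
--             new_rule.append(sub_rule)
--         if new_rule:
--             new_rules.append(tuple(new_rule))
--
--     return new_rules
-- ===== SOURCE B (Python) =====
-- def generate_all_non_nullable_combinations(rule, nullable):
--     # Right fold: process symbols right-to-left; a nullable symbol doubles the
--     # variant list (drop-variant before keep-variant), so the leftmost nullable
--     # varies fastest -- exactly A's LSB-first enumeration order.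
--     variants = [[]]
--     for sym in reversed(rule):
--         if sym in nullable:
--             variants = [w for v in variants for w in (v, [sym] + v)]
--         else:
--             variants = [[sym] + v for v in variants]
--     return [tuple(v) for v in variants if v]
-- ===== Notes on version B (the rewrite author's own statement) =====
-- stated objective: simpler
-- what changed: Replaces A's enumeration of 2^k indices with per-index binary-string construction and a position-tracking inner scan by a single right-to-left fold that doubles the variant list at each nullable symbol (drop-variant before keep-variant), then filters out the empty variant.
import Mathlib
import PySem

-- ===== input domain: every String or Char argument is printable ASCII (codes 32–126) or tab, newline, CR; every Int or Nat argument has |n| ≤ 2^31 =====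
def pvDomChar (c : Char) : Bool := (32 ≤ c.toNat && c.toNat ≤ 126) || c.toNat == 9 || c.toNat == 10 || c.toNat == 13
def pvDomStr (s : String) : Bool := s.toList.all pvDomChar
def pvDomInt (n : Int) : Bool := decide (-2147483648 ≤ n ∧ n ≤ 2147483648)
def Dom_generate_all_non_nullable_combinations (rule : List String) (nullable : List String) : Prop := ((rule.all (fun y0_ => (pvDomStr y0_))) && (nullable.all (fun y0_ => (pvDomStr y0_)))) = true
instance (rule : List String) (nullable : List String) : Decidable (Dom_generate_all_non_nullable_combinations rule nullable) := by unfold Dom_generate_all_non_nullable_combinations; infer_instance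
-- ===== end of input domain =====

-- B replaces A's 2^k binary-string index enumeration with a single right-to-left fold
-- that doubles the variant list at each nullable symbol (objective: simpler).

-- ===== PORT A =====
-- helper for f'{i:b}' on i > 0: binary digits, most significant first
def pvBitsA : Nat → List Char
  | 0 => []
  | n+1 => pvBitsA ((n+1)/2) ++ [if (n+1) % 2 = 1 then '1' else '0']
decreasing_by omega

-- f'{i:b}' (f'{0:b}' = '0')
def pvBinRepr (i : Nat) : List Char := if i = 0 then ['0'] else pvBitsA i

def generate_all_non_nullable_combinations (rule : List String) (nullable : List String) : List (List String) :=
  let nullables_at : List Nat :=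
    (List.range rule.length).filter (fun sr_i => decide (rule.getD sr_i "" ∈ nullable))
  let no_nullables := nullables_at.length
  (List.range (2 ^ no_nullables)).foldl
    (fun new_rules i =>
      -- nullables_to_use = '0' * no_nullables + f'{i:b}'
      let nullables_to_use : List Char := List.replicate no_nullables '0' ++ pvBinRepr i
      -- inner loop over enumerate(rule) with state (nullable_index, new_rule)
      let res := (PySem.List.enumerate rule).foldl
        (fun st p =>
          if st.1 < nullables_at.length ∧ p.1 = ((nullables_at.getD st.1 0 : Nat) : Int) then
            (st.1 + 1,
              if PySem.List.pyGet? nullables_to_use (-((st.1 + 1 : Nat) : Int)) = some '0' then st.2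
              else st.2 ++ [p.2])
          else (st.1, st.2 ++ [p.2]))
        ((0 : Nat), ([] : List String))
      if res.2 ≠ [] then new_rules ++ [res.2] else new_rules)
    []

-- ===== PORT B =====
def generate_all_non_nullable_combinations_alt (rule : List String) (nullable : List String) : List (List String) :=
  let variants := rule.reverse.foldl
    (fun variants sym =>
      if sym ∈ nullable then variants.flatMap (fun v => [v, sym :: v])
      else variants.map (fun v => sym :: v))
    [[]]
  variants.filter (fun v => !v.isEmpty)

-- ===== PRECONDITION & SPEC =====
def Spec_generate_all_non_nullable_combinations (rule : List String) (nullable : List String) (out : List (List String)) : Prop := out = generate_all_non_nullable_combinations_alt rule nullable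
instance (rule : List String) (nullable : List String) (out : List (List String)) : Decidable (Spec_generate_all_non_nullable_combinations rule nullable out) := by unfold Spec_generate_all_non_nullable_combinations; infer_instance

-- ===== CLAIM (what is proved, stated in full; the proofs are below) =====
def Claim_equal_generate_all_non_nullable_combinations : Prop := ∀ (rule : List String) (nullable : List String), Dom_generate_all_non_nullable_combinations rule nullable → Spec_generate_all_non_nullable_combinations rule nullable (generate_all_non_nullable_combinations rule nullable)

-- ===== LEMMAS AND PROOFS =====

-- intended result of B's fold, as structural recursion on the rule
def pvGen (nb : List String) : List String → List (List String)
  | [] => [[]]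
  | s :: rest => if s ∈ nb then (pvGen nb rest).flatMap (fun v => [v, s :: v]) else (pvGen nb rest).map (fun v => s :: v)

-- the variant selected by index i, consuming bits LSB-first left-to-right
def pvSelF (nb : List String) : List String → Nat → List String
  | [], _ => []
  | s :: rest, i => if s ∈ nb then (if i % 2 = 1 then s :: pvSelF nb rest (i/2) else pvSelF nb rest (i/2)) else s :: pvSelF nb rest i

-- same, parametrised by the next bit position b of a fixed index i
def pvSelAt (nb : List String) (i : Nat) : List String → Nat → List String
  | [], _ => []
  | s :: rest, b => if s ∈ nb then (if i.testBit b then s :: pvSelAt nb i rest (b+1) else pvSelAt nb i rest (b+1)) else s :: pvSelAt nb i rest b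

-- positions (from offset o) of the nullable symbols
def pvNulPos (nb : List String) : Nat → List String → List Nat
  | _, [] => []
  | o, s :: rest => if s ∈ nb then o :: pvNulPos nb (o+1) rest else pvNulPos nb (o+1) rest

-- binary digits LSB-first
def pvLsb : Nat → List Char
  | 0 => []
  | n+1 => (if (n+1) % 2 = 1 then '1' else '0') :: pvLsb ((n+1)/2)
decreasing_by omega

theorem pvBitsA_reverse (i : Nat) : (pvBitsA i).reverse = pvLsb i := by
  induction i using pvBitsA.induct with
  | case1 => simp [pvBitsA, pvLsb]
  | case2 n ih => simp [pvBitsA, pvLsb, ih]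

theorem pvLsb_lt (i : Nat) : i < 2 ^ (pvLsb i).length := by
  induction i using pvLsb.induct with
  | case1 => simp [pvLsb]
  | case2 n ih =>
    simp only [pvLsb, List.length_cons, pow_succ]
    omega

theorem pvLsb_get (i j : Nat) (h : j < (pvLsb i).length) :
    (pvLsb i)[j]? = some (if i.testBit j then '1' else '0') := by
  induction i using pvLsb.induct generalizing j with
  | case1 => simp [pvLsb] at h
  | case2 n ih =>
    match j with
    | 0 => simp [pvLsb, Nat.testBit_zero]
    | j + 1 =>
      simp only [pvLsb, List.length_cons] at h
      simp only [pvLsb, List.getElem?_cons_succ, Nat.testBit_succ]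
      exact ih j (by omega)

theorem pvTestBit_div (b i : Nat) : i.testBit b = decide (i / 2 ^ b % 2 = 1) := by
  induction b generalizing i with
  | zero => simp [Nat.testBit_zero]
  | succ b ih =>
    rw [Nat.testBit_succ, ih]
    have : i / 2 / 2 ^ b = i / 2 ^ (b + 1) := by
      rw [Nat.div_div_eq_div_mul, pow_succ, Nat.mul_comm]
    rw [this]

theorem pvCharAt (k i ni : Nat) (h1 : 1 ≤ ni) (h2 : ni ≤ k) :
    PySem.List.pyGet? (List.replicate k '0' ++ pvBinRepr i) (-(ni : Int))
      = some (if i.testBit (ni - 1) then '1' else '0') := by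
  have hrevlen : (pvBitsA i).length = (pvLsb i).length := by
    rw [← pvBitsA_reverse]; simp
  have hm : 1 ≤ (pvBinRepr i).length := by
    unfold pvBinRepr
    split
    · simp
    · rename_i hi
      rw [hrevlen]
      have hlt := pvLsb_lt i
      rcases Nat.eq_zero_or_pos (pvLsb i).length with h0 | h0
      · rw [h0] at hlt; simp at hlt; omega
      · exact h0
  have hlt2 : i < 2 ^ (pvBinRepr i).length := by
    unfold pvBinRepr
    split
    · rename_i hi; subst hi; norm_num
    · rw [hrevlen]; exact pvLsb_lt i
  have hget : ∀ j, j < (pvBinRepr i).length →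
      (pvBinRepr i).reverse[j]? = some (if i.testBit j then '1' else '0') := by
    intro j hj
    by_cases hi : i = 0
    · subst hi
      have hj0 : j = 0 := by simp [pvBinRepr] at hj; omega
      subst hj0
      simp [pvBinRepr, Nat.testBit_zero]
    · unfold pvBinRepr at hj ⊢
      rw [if_neg hi] at hj ⊢
      rw [pvBitsA_reverse]
      exact pvLsb_get i j (by omega)
  have hL : (List.replicate k '0' ++ pvBinRepr i).length = k + (pvBinRepr i).length := by simp
  rw [PySem.List.pyGet?_neg_natCast _ ni (by omega) (by rw [hL]; omega), hL]
  have hidx : k + (pvBinRepr i).length - ni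
      = (List.replicate k '0' ++ pvBinRepr i).length - 1 - (ni - 1) := by
    rw [hL]; omega
  rw [hidx, ← List.getElem?_reverse (by rw [hL]; omega)]
  rw [List.reverse_append, List.reverse_replicate]
  by_cases hcase : ni - 1 < (pvBinRepr i).length
  · rw [List.getElem?_append_left (by simpa using hcase)]
    exact hget (ni - 1) hcase
  · rw [List.getElem?_append_right (by simp; omega)]
    have hbit : i.testBit (ni - 1) = false :=
      Nat.testBit_eq_false_of_lt
        (lt_of_lt_of_le hlt2 (Nat.pow_le_pow_right (by norm_num) (by omega)))
    rw [hbit, List.getElem?_replicate, if_pos (by simp; omega)]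
    simp

theorem pvNulPos_length (nb : List String) (o : Nat) (l : List String) :
    (pvNulPos nb o l).length = l.countP (fun s => decide (s ∈ nb)) := by
  induction l generalizing o with
  | nil => simp [pvNulPos]
  | cons s rest ih =>
    simp only [pvNulPos, List.countP_cons]
    by_cases h : s ∈ nb
    · simp [h, ih]
    · simp [h, ih]

theorem pvNulPos_ge (nb : List String) (o : Nat) (l : List String) :
    ∀ x ∈ pvNulPos nb o l, o ≤ x := by
  induction l generalizing o with
  | nil => simp [pvNulPos]
  | cons s rest ih =>
    intro x hx
    simp only [pvNulPos] at hx
    by_cases h : s ∈ nb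
    · rw [if_pos h] at hx
      rcases List.mem_cons.mp hx with h1 | h1
      · omega
      · have := ih (o + 1) x h1; omega
    · rw [if_neg h] at hx
      have := ih (o + 1) x hx; omega

theorem pvRangeFilter (nb : List String) (pre rest : List String) :
    (List.range' pre.length rest.length).filter
        (fun j => decide ((pre ++ rest).getD j "" ∈ nb))
      = pvNulPos nb pre.length rest := by
  induction rest generalizing pre with
  | nil => simp [pvNulPos]
  | cons s rest ih =>
    simp only [List.length_cons, List.range'_succ, List.filter_cons]
    have hhead : (pre ++ s :: rest).getD pre.length "" = s := by
      unfold List.getD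
      rw [List.getElem?_append_right (le_refl _)]
      simp
    have htail : (List.range' (pre.length + 1) rest.length).filter
        (fun j => decide ((pre ++ s :: rest).getD j "" ∈ nb)) = pvNulPos nb (pre.length + 1) rest := by
      have h2 := ih (pre ++ [s])
      simp only [List.length_append, List.length_singleton, List.append_assoc,
        List.singleton_append] at h2
      exact h2
    rw [hhead, htail]
    simp only [pvNulPos]
    by_cases h : s ∈ nb
    · simp [h]
    · simp [h]

theorem pvInner (nb : List String) (P0 : List Nat) (i : Nat)
    (rest : List String) (ni o : Nat) (acc : List String)
    (hdrop : P0.drop ni = pvNulPos nb o rest) :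
    (PySem.List.enumerate rest (o : Int)).foldl
        (fun st p =>
          if st.1 < P0.length ∧ p.1 = ((P0.getD st.1 0 : Nat) : Int) then
            (st.1 + 1,
              if PySem.List.pyGet? (List.replicate P0.length '0' ++ pvBinRepr i) (-((st.1 + 1 : Nat) : Int)) = some '0' then st.2
              else st.2 ++ [p.2])
          else (st.1, st.2 ++ [p.2]))
        (ni, acc)
      = (ni + (pvNulPos nb o rest).length, acc ++ pvSelAt nb i rest ni) := by
  induction rest generalizing ni o acc with
  | nil => simp [pvNulPos, pvSelAt, PySem.List.enumerate_nil]
  | cons s rest ih =>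
    rw [PySem.List.enumerate_cons]
    have hcast : ((o : Int) + 1) = ((o + 1 : Nat) : Int) := by push_cast; ring
    by_cases h : s ∈ nb
    · simp only [pvNulPos, if_pos h] at hdrop
      have hlen : ni < P0.length := by
        have hl := congrArg List.length hdrop
        simp at hl
        omega
      have hget : P0[ni]? = some o := by
        have h0 : (P0.drop ni)[0]? = some o := by rw [hdrop]; simp
        rw [List.getElem?_drop] at h0
        simpa using h0
      have hgetD : P0.getD ni 0 = o := by simp [List.getD, hget]
      have hdrop' : P0.drop (ni + 1) = pvNulPos nb (o + 1) rest := by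
        have hd : P0.drop (ni + 1) = List.drop 1 (P0.drop ni) := by
          rw [List.drop_drop]
        rw [hd, hdrop]
        simp
      have hc : ni < P0.length ∧ ((o : Int) = ((P0.getD ni 0 : Nat) : Int)) :=
        ⟨hlen, by exact_mod_cast hgetD.symm⟩
      have hchar := pvCharAt P0.length i (ni + 1) (by omega) (by omega)
      simp only [Nat.add_sub_cancel] at hchar
      simp only [List.foldl_cons]
      rw [if_pos hc, hchar]
      by_cases hb : i.testBit ni
      · rw [if_neg (by simp [hb])]
        rw [hcast, ih (ni + 1) (o + 1) (acc ++ [s]) hdrop']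
        simp [pvNulPos, if_pos h, pvSelAt, hb]
        omega
      · rw [if_pos (by simp [hb])]
        rw [hcast, ih (ni + 1) (o + 1) acc hdrop']
        simp [pvNulPos, if_pos h, pvSelAt, hb]
        omega
    · simp only [pvNulPos, if_neg h] at hdrop
      have hnc : ¬ (ni < P0.length ∧ ((o : Int) = ((P0.getD ni 0 : Nat) : Int))) := by
        rintro ⟨hlen, heq⟩
        have hgd : P0.getD ni 0 = o := by exact_mod_cast heq.symm
        have hg : P0[ni]? = some o := by
          rw [List.getElem?_eq_getElem hlen]
          rw [← List.getD_eq_getElem P0 0 hlen, hgd]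
        have h0 : (P0.drop ni)[0]? = some o := by
          rw [List.getElem?_drop]
          simpa using hg
        rw [hdrop] at h0
        have hmem : o ∈ pvNulPos nb (o + 1) rest := List.mem_of_getElem? h0
        have := pvNulPos_ge nb (o + 1) rest o hmem
        omega
      simp only [List.foldl_cons]
      rw [if_neg hnc]
      rw [hcast, ih ni (o + 1) (acc ++ [s]) hdrop]
      simp [pvNulPos, if_neg h, pvSelAt]

theorem pvSelAt_eq_selF (nb : List String) (i : Nat) (rest : List String) (b : Nat) :
    pvSelAt nb i rest b = pvSelF nb rest (i / 2 ^ b) := by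
  induction rest generalizing b with
  | nil => simp [pvSelAt, pvSelF]
  | cons s rest ih =>
    simp only [pvSelAt, pvSelF]
    by_cases h : s ∈ nb
    · rw [if_pos h, if_pos h]
      have hdiv : i / 2 ^ b / 2 = i / 2 ^ (b + 1) := by
        rw [Nat.div_div_eq_div_mul, pow_succ]
      have hbit : i.testBit b = decide (i / 2 ^ b % 2 = 1) := pvTestBit_div b i
      rw [hbit, hdiv, ih (b + 1)]
      by_cases hb : i / 2 ^ b % 2 = 1
      · simp [hb]
      · simp [hb]
    · rw [if_neg h, if_neg h, ih b]

theorem pvRange_two_mul (n : Nat) :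
    List.range (2 * n) = (List.range n).flatMap (fun j => [2 * j, 2 * j + 1]) := by
  induction n with
  | zero => simp
  | succ n ih =>
    have : 2 * (n + 1) = (2 * n + 1) + 1 := by ring
    rw [this, List.range_succ, List.range_succ, List.range_succ, ih]
    simp [List.flatMap_append]

theorem pvGen_eq_map (nb : List String) (rule : List String) :
    pvGen nb rule
      = (List.range (2 ^ rule.countP (fun s => decide (s ∈ nb)))).map (pvSelF nb rule) := by
  induction rule with
  | nil => simp [pvGen, pvSelF]
  | cons s rest ih =>
    by_cases h : s ∈ nb
    · have hc : List.countP (fun s => decide (s ∈ nb)) (s :: rest)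
          = List.countP (fun s => decide (s ∈ nb)) rest + 1 := by
        simp [h]
      have hp : 2 ^ (List.countP (fun s => decide (s ∈ nb)) rest + 1)
          = 2 * 2 ^ List.countP (fun s => decide (s ∈ nb)) rest := by
        rw [pow_succ, Nat.mul_comm]
      simp only [pvGen, if_pos h, hc, hp, pvRange_two_mul, List.map_flatMap, ih,
        List.flatMap_map]
      apply List.flatMap_congr
      intro j _
      simp only [List.map_cons, List.map_nil, pvSelF, if_pos h]
      have h0 : (2 * j) % 2 = 0 := by omega
      have h1 : (2 * j + 1) % 2 = 1 := by omega
      have h2 : (2 * j) / 2 = j := by omega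
      have h3 : (2 * j + 1) / 2 = j := by omega
      rw [h0, h1, h2, h3]
      simp
    · have hc : List.countP (fun s => decide (s ∈ nb)) (s :: rest)
          = List.countP (fun s => decide (s ∈ nb)) rest := by
        simp [h]
      simp only [pvGen, if_neg h, hc, ih, List.map_map]
      apply List.map_congr_left
      intro j _
      simp [pvSelF, if_neg h]

theorem pvFoldl_if_ne (g : Nat → List String) (l : List Nat) (acc : List (List String)) :
    l.foldl (fun acc i => if g i ≠ [] then acc ++ [g i] else acc) acc
      = acc ++ ((l.map g).filter (fun v => !v.isEmpty)) := by
  induction l generalizing acc with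
  | nil => simp
  | cons x l ih =>
    rw [List.foldl_cons, ih]
    by_cases h : g x = []
    · simp [h]
    · simp [h]

theorem pvB_eq (rule nb : List String) :
    generate_all_non_nullable_combinations_alt rule nb
      = (pvGen nb rule).filter (fun v => !v.isEmpty) := by
  have hfold : ∀ (r : List String),
      List.foldr (fun x y => if x ∈ nb then y.flatMap (fun v => [v, x :: v])
          else y.map (fun v => x :: v)) [[]] r
        = pvGen nb r := by
    intro r
    induction r with
    | nil => simp [pvGen]
    | cons s rest ih => by_cases h : s ∈ nb <;> simp [pvGen, h, ih]
  simp only [generate_all_non_nullable_combinations_alt]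
  rw [List.foldl_reverse, hfold]

-- ===== VERDICT (by name: the statement is the Claim_ definition above) =====
theorem generate_all_non_nullable_combinations_spec : Claim_equal_generate_all_non_nullable_combinations := by
  intro rule nb _
  unfold Spec_generate_all_non_nullable_combinations
  rw [pvB_eq]
  simp only [generate_all_non_nullable_combinations]
  have hP : (List.range rule.length).filter (fun sr_i => decide (rule.getD sr_i "" ∈ nb))
      = pvNulPos nb 0 rule := by
    have h := pvRangeFilter nb [] rule
    simpa [List.range_eq_range'] using h
  rw [hP]
  have hbuild : ∀ (acc : List (List String)) (j : Nat), j ∈ List.range (2 ^ (pvNulPos nb 0 rule).length) →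
      (fun new_rules i =>
        let nullables_to_use : List Char := List.replicate (pvNulPos nb 0 rule).length '0' ++ pvBinRepr i
        let res := (PySem.List.enumerate rule).foldl
          (fun st p =>
            if st.1 < (pvNulPos nb 0 rule).length ∧ p.1 = (((pvNulPos nb 0 rule).getD st.1 0 : Nat) : Int) then
              (st.1 + 1,
                if PySem.List.pyGet? nullables_to_use (-((st.1 + 1 : Nat) : Int)) = some '0' then st.2
                else st.2 ++ [p.2])
            else (st.1, st.2 ++ [p.2]))
          ((0 : Nat), ([] : List String))
        if res.2 ≠ [] then new_rules ++ [res.2] else new_rules) acc j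
      = (fun new_rules i => if pvSelF nb rule i ≠ [] then new_rules ++ [pvSelF nb rule i] else new_rules) acc j := by
    intro acc j _
    have hin := pvInner nb (pvNulPos nb 0 rule) j rule 0 0 []
      (by simp)
    simp only []
    rw [show ((0 : Int)) = ((0 : Nat) : Int) by norm_num] at *
    rw [hin]
    rw [pvSelAt_eq_selF]
    simp
  rw [PySem.List.foldl_congr_mem _ _ _ _ hbuild]
  rw [pvFoldl_if_ne]
  rw [pvGen_eq_map]
  have hk : (pvNulPos nb 0 rule).length = rule.countP (fun s => decide (s ∈ nb)) :=
    pvNulPos_length nb 0 rule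
  rw [hk]
  simp
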